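-- pv_equiv track=rewrite | github.com/VISHWAJITHA28/medresearch-agent | synthesizer.py | _analyze_temporal_trends
-- ===== SOURCE A (Python) =====
-- from typing import Dict, List, Any, Set
--
-- def _analyze_temporal_trends(papers: List[Dict[str, Any]]) -> Dict[str, Any]:
--     """Analyze trends over time in the research."""
--     years = [p.get("year", 2024) for p in papers]
--
--     if not years:
--         return {"trend": "Unable to determine", "span": "Unknown"}
--
--     year_range = max(years) - min(years)
--
--     if year_range <= 2:
--         trend = "Recent cluster of studies"
--     elif year_range <= 5:
--         trend = "Emerging research area"
--     else:
--         trend = "Well-established research area"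
--
--     return {
--         "trend": trend,
--         "span": f"{min(years)}-{max(years)}",
--         "recent_activity": f"{sum(1 for y in years if y >= 2020)} papers from 2020 onwards",
--     }
-- ===== SOURCE B (Python) =====
-- def _analyze_temporal_trends(papers):
--     """Sort the years descending once; max/min are the two ends of the sorted
--     list and the recent count is an early-exit prefix scan of it."""
--     ys = sorted((p.get("year", 2024) for p in papers), reverse=True)
--     if not ys:
--         return {"trend": "Unable to determine", "span": "Unknown"}
--     mx = ys[0]
--     mn = ys[-1]
--     recent = 0
--     for y in ys:
--         if y < 2020:
--             break
--         recent += 1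
--     r = mx - mn
--     if r <= 2:
--         trend = "Recent cluster of studies"
--     elif r <= 5:
--         trend = "Emerging research area"
--     else:
--         trend = "Well-established research area"
--     return {
--         "trend": trend,
--         "span": f"{mn}-{mx}",
--         "recent_activity": f"{recent} papers from 2020 onwards",
--     }
-- ===== Notes on version B (the rewrite author's own statement) =====
-- stated objective: alternative
-- what changed: Instead of A's list comprehension plus four separate full scans (max, min, min/max again, and a generator sum), B sorts the years descending once, reads the max and min from the first and last elements of the sorted list, and counts recent papers by an early-exit scan of the sorted prefix (stopping at the first year < 2020).
import Mathlib
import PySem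

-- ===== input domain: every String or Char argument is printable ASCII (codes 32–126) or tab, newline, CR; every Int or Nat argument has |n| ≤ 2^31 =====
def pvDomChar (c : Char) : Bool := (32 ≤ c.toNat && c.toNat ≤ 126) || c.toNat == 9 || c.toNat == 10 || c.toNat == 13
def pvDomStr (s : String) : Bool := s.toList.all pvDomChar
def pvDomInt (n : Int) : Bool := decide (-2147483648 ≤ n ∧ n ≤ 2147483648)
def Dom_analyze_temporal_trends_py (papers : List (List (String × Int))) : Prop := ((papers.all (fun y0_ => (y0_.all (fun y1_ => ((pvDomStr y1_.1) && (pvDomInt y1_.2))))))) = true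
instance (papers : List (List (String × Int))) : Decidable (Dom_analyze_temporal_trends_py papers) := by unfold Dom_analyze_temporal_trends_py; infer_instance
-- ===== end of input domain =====

-- B replaces A's four full scans (max, min, min/max again, 0/1-sum) with one
-- descending sort: max/min are the ends of the sorted list and the recent count
-- is an early-exit prefix scan of it; objective: alternative decomposition.

-- shared primitive: Python's p.get("year", 2024) on an association list (first match)
def pvGetYear (p : List (String × Int)) : Int :=
  ((p.find? (fun kv => kv.1 == "year")).map (·.2)).getD 2024

-- ===== PORT A =====
def analyze_temporal_trends_py (papers : List (List (String × Int))) : List (String × String) :=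
  let years := papers.map pvGetYear
  if years = [] then
    [("trend", "Unable to determine"), ("span", "Unknown")]
  else
    let year_range := (PySem.List.max? years (fun y => y)).getD 0 - (PySem.List.min? years (fun y => y)).getD 0
    let trend :=
      if year_range ≤ 2 then "Recent cluster of studies"
      else if year_range ≤ 5 then "Emerging research area"
      else "Well-established research area"
    [("trend", trend),
     ("span", PySem.Int.toStr ((PySem.List.min? years (fun y => y)).getD 0) ++ "-" ++
              PySem.Int.toStr ((PySem.List.max? years (fun y => y)).getD 0)),
     ("recent_activity",
        PySem.Int.toStr ((years.map (fun y => if 2020 ≤ y then (1 : Int) else 0)).sum) ++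
        " papers from 2020 onwards")]

-- ===== PORT B =====
-- the 'for y in ys: if y < 2020: break; recent += 1' early-exit loop
def pvCountRecent : List Int → Int
  | [] => 0
  | y :: t => if y < 2020 then 0 else pvCountRecent t + 1

def analyze_temporal_trends_py_alt (papers : List (List (String × Int))) : List (String × String) :=
  let ys := PySem.List.sorted (papers.map pvGetYear) (fun y => y) true
  if ys = [] then
    [("trend", "Unable to determine"), ("span", "Unknown")]
  else
    let mx := PySem.List.pyGetD ys 0 0
    let mn := PySem.List.pyGetD ys (-1) 0
    let recent := pvCountRecent ys
    let r := mx - mn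
    let trend :=
      if r ≤ 2 then "Recent cluster of studies"
      else if r ≤ 5 then "Emerging research area"
      else "Well-established research area"
    [("trend", trend),
     ("span", PySem.Int.toStr mn ++ "-" ++ PySem.Int.toStr mx),
     ("recent_activity", PySem.Int.toStr recent ++ " papers from 2020 onwards")]

-- ===== PRECONDITION & SPEC =====
def Spec_analyze_temporal_trends_py (papers : List (List (String × Int))) (out : List (String × String)) : Prop := out = analyze_temporal_trends_py_alt papers
instance (papers : List (List (String × Int))) (out : List (String × String)) : Decidable (Spec_analyze_temporal_trends_py papers out) := by unfold Spec_analyze_temporal_trends_py; infer_instance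

-- ===== CLAIM (what is proved, stated in full; the proofs are below) =====
def Claim_equal_analyze_temporal_trends_py : Prop := ∀ (papers : List (List (String × Int))), Dom_analyze_temporal_trends_py papers → Spec_analyze_temporal_trends_py papers (analyze_temporal_trends_py papers)

-- ===== LEMMAS AND PROOFS =====

-- the last element of a descending list is below every element
lemma pv_getLast_le : ∀ (l : List Int), l.Pairwise (fun a b => b ≤ a) →
    ∀ x ∈ l, ∀ (hl : l ≠ []), l.getLast hl ≤ x := by
  intro l
  induction l with
  | nil => intro _ x hx; cases hx
  | cons a t ih =>
    intro hp x hx hl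
    rcases List.pairwise_cons.mp hp with ⟨ha, ht⟩
    cases t with
    | nil => simp at hx; simp [hx]
    | cons b s =>
      have htne : b :: s ≠ [] := by simp
      rw [List.getLast_cons htne]
      have hlast : (b :: s).getLast htne ∈ b :: s := List.getLast_mem htne
      rcases List.mem_cons.mp hx with rfl | hxt
      · exact le_trans (ih ht _ hlast htne) (ha _ hlast)
      · exact ih ht x hxt htne

-- on a descending list, the early-exit prefix count is the full ≥2020 count
lemma pv_countRecent_eq (l : List Int) (hp : l.Pairwise (fun a b => b ≤ a)) :
    pvCountRecent l = (l.countP (fun y => 2020 ≤ y) : Int) := by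
  induction l with
  | nil => simp [pvCountRecent]
  | cons y t ih =>
    rcases List.pairwise_cons.mp hp with ⟨hy, ht⟩
    simp only [pvCountRecent, List.countP_cons]
    by_cases h : y < 2020
    · rw [if_pos h]
      have hz : t.countP (fun y => decide (2020 ≤ y)) = 0 := by
        rw [List.countP_eq_zero]
        intro a ha
        have := hy a ha
        simp only [decide_eq_true_eq]
        omega
      have hy0 : decide (2020 ≤ y) = false := by simp; omega
      simp [hz, hy0]
    · rw [if_neg h, ih ht]
      have hy1 : decide (2020 ≤ y) = true := by simp; omega
      simp [hy1]

-- A's 0/1-sum is countP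
lemma pv_sum_ite (ys : List Int) :
    (ys.map (fun y => if 2020 ≤ y then (1 : Int) else 0)).sum =
      (ys.countP (fun y => 2020 ≤ y) : Int) := by
  induction ys with
  | nil => simp
  | cons y t ih =>
    simp only [List.map_cons, List.sum_cons, List.countP_cons, ih]
    simp only [decide_eq_true_eq]; split_ifs <;> push_cast <;> omega

-- ===== VERDICT (by name: the statement is the Claim_ definition above) =====
theorem analyze_temporal_trends_py_spec : Claim_equal_analyze_temporal_trends_py := by
  intro papers _
  unfold Spec_analyze_temporal_trends_py
  cases hys : papers.map pvGetYear with
  | nil =>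
    have : papers = [] := by cases papers <;> simp_all
    subst this
    rfl
  | cons y0 ytl =>
    have hne : papers.map pvGetYear ≠ [] := by rw [hys]; simp
    simp only [analyze_temporal_trends_py, analyze_temporal_trends_py_alt]
    generalize hssEq : PySem.List.sorted (papers.map pvGetYear) (fun y => y) true = ss
    have hsne : ss ≠ [] := by
      rw [← hssEq, Ne, PySem.List.sorted_eq_nil_iff]; exact hne
    have hperm : ss.Perm (papers.map pvGetYear) := by
      rw [← hssEq]; exact PySem.List.sorted_perm _ _ _
    have hpair : ss.Pairwise (fun a b => b ≤ a) := by
      rw [← hssEq]; exact PySem.List.sorted_pairwise_rev _ _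
    obtain ⟨h0, t0, hcons⟩ := List.exists_cons_of_ne_nil hsne
    -- facts about A's max / min values
    have hM := PySem.List.le_foldl_max ytl y0
    have hMmem : ytl.foldl max y0 ∈ papers.map pvGetYear := by
      rcases PySem.List.foldl_max_mem ytl y0 with h | h <;> rw [hys]
      · rw [h]; exact List.mem_cons_self
      · exact List.mem_cons_of_mem _ h
    have hm := PySem.List.foldl_min_le ytl y0
    have hmmem : ytl.foldl min y0 ∈ papers.map pvGetYear := by
      rcases PySem.List.foldl_min_mem ytl y0 with h | h <;> rw [hys]
      · rw [h]; exact List.mem_cons_self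
      · exact List.mem_cons_of_mem _ h
    have hMall : ∀ y ∈ papers.map pvGetYear, y ≤ ytl.foldl max y0 := by
      intro y hy; rw [hys] at hy
      rcases List.mem_cons.mp hy with rfl | hyt
      · exact hM.1
      · exact hM.2 y hyt
    have hmall : ∀ y ∈ papers.map pvGetYear, ytl.foldl min y0 ≤ y := by
      intro y hy; rw [hys] at hy
      rcases List.mem_cons.mp hy with rfl | hyt
      · exact hm.1
      · exact hm.2 y hyt
    -- head of ss = A's max
    have hheadmem : h0 ∈ papers.map pvGetYear :=
      hperm.mem_iff.mp (by rw [hcons]; exact List.mem_cons_self)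
    have hsorted_eq : PySem.List.sorted (papers.map pvGetYear) (fun y => y) true = h0 :: t0 := by
      rw [hssEq]; exact hcons
    have hhead_ge : ∀ y ∈ papers.map pvGetYear, y ≤ h0 := fun y hy =>
      PySem.List.key_head_sorted_rev_ge (papers.map pvGetYear) (fun y => y) hsorted_eq y hy
    have hmx : PySem.List.pyGetD ss 0 0 = ytl.foldl max y0 := by
      rw [hcons, PySem.List.pyGetD_zero_cons]
      exact le_antisymm (hMall _ hheadmem) (hhead_ge _ hMmem)
    -- last of ss = A's min
    have hlastmem : ss.getLast hsne ∈ papers.map pvGetYear :=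
      hperm.mem_iff.mp (List.getLast_mem hsne)
    have hmn : PySem.List.pyGetD ss (-1) 0 = ytl.foldl min y0 := by
      rw [PySem.List.pyGetD_neg_one ss 0 hsne]
      refine le_antisymm ?_ (hmall _ hlastmem)
      exact pv_getLast_le ss hpair _ (hperm.mem_iff.mpr hmmem) hsne
    -- early-exit count = A's 0/1-sum
    have hrec : pvCountRecent ss =
        ((papers.map pvGetYear).map (fun y => if 2020 ≤ y then (1 : Int) else 0)).sum := by
      rw [pv_countRecent_eq ss hpair, pv_sum_ite, hperm.countP_eq]
    -- assemble
    rw [if_neg hne, if_neg hsne, hmx, hmn, hrec, hys, PySem.List.max?_id_cons,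
        PySem.List.min?_id_cons]
    simp only [Option.getD_some]
    rfl
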